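-- pv_equiv track=rewrite | github.com/kuznetsovvj/education | algorithms/codeforces/1759a.py | check
-- ===== SOURCE A (Python) =====
-- def check(w):
--     ptr = "Yes" * (len(w) // 3 + 3)
--     start = -1
--     for i in range(3):
--         if w[0] == ptr[i]:
--             start = i
--     if start == -1:
--         return "NO"
--     t = 0
--     while t < len(w):
--         if w[t] != ptr[start+t]:
--             return "NO"
--         t += 1
--     return "YES"
-- ===== SOURCE B (Python) =====
-- def check(w):
--     pattern = "Yes" * (len(w) // 3 + 2)
--     return "YES" if w in pattern else "NO"
-- ===== Notes on version B (the rewrite author's own statement) =====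
-- stated objective: idiomatic
-- what changed: Replaces A's explicit first-character alignment over 'Yes' plus a per-character forward scan with a single built-in substring-membership test against a sufficiently long repetition of 'Yes'.
import Mathlib
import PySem

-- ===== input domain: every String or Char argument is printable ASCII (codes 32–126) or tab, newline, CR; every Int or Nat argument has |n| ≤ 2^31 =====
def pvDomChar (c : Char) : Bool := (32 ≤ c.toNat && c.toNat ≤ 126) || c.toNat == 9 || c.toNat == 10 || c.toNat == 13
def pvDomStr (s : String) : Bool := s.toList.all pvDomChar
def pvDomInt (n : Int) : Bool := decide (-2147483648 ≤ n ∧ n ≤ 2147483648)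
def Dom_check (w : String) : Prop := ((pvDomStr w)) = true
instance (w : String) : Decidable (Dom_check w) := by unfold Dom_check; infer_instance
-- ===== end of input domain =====

-- B (Source B) replaces A's first-character alignment + per-character scan by one substring test
-- against a long-enough repetition of "Yes" (objective: idiomatic; same cost).
-- "Yes" * m  (m : Nat); exact for Python str*int with a nonnegative count
def pvRepYes (m : Nat) : List Char := List.flatten (List.replicate m ['Y', 'e', 's'])

-- ===== PORT A =====
-- while t < len(w): if w[t] != ptr[start+t]: return "NO"; t += 1   — t starts at 0, so a Nat counter;
-- both indices are nonnegative and, whenever the comparison is reached, in range, so Option equality is exact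
def pvLoopA (wc ptr : List Char) (start : Int) (t : Nat) : String :=
  if t < wc.length then
    if PySem.List.pyGet? wc (t : Int) ≠ PySem.List.pyGet? ptr (start + (t : Int)) then "NO"
    else pvLoopA wc ptr start (t + 1)
  else "YES"
termination_by wc.length - t
decreasing_by omega

def check (w : String) : String :=
  let wc := w.toList
  -- ptr = "Yes" * (len(w) // 3 + 3);  len(w) // 3 = len / 3 on Nat since len ≥ 0
  let ptr := pvRepYes (wc.length / 3 + 3)
  match PySem.List.pyGet? wc 0 with
  | none => ""        -- Python raises IndexError here (empty w) — excluded by Pre_check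
  | some c0 =>
    -- for i in range(3): if w[0] == ptr[i]: start = i   (ptr[i] always in range: |ptr| ≥ 9)
    let start : Int := (PySem.List.pyRange 0 3 1).foldl
      (fun start i => if some c0 = PySem.List.pyGet? ptr i then i else start) (-1)
    if start = -1 then "NO"
    else pvLoopA wc ptr start 0

-- ===== PORT B =====
def check_alt (w : String) : String :=
  -- pattern = "Yes" * (len(w) // 3 + 2)
  let pattern := pvRepYes (w.toList.length / 3 + 2)
  -- return "YES" if w in pattern else "NO"
  if PySem.Chars.isIn w.toList pattern then "YES" else "NO"

-- ===== PRECONDITION & SPEC =====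
-- Pre_check excludes only the empty string, on which A raises IndexError at w[0].
def Pre_check (w : String) : Prop := w ≠ ""
instance (w : String) : Decidable (Pre_check w) := by unfold Pre_check; infer_instance
def pvWitness_check : String := "Yes"

def Spec_check (w : String) (out : String) : Prop := out = check_alt w
instance (w : String) (out : String) : Decidable (Spec_check w out) := by unfold Spec_check; infer_instance

-- ===== CLAIM (what is proved, stated in full; the proofs are below) =====
def Claim_equal_check : Prop := ∀ (w : String), Dom_check w → Pre_check w → Spec_check w (check w)

-- ===== LEMMAS AND PROOFS =====

-- the character of "Yes" at position r (read mod 3)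
def pvYc (r : Nat) : Char := if r % 3 = 0 then 'Y' else if r % 3 = 1 then 'e' else 's'

theorem pvRepYes_succ (m : Nat) : pvRepYes (m + 1) = 'Y' :: 'e' :: 's' :: pvRepYes m := by
  simp [pvRepYes, List.replicate_succ]

theorem pvRepYes_length (m : Nat) : (pvRepYes m).length = 3 * m := by
  induction m with
  | zero => simp [pvRepYes]
  | succ k ih => rw [pvRepYes_succ]; simp [ih]; omega

theorem pvRepYes_get (m j : Nat) (h : j < 3 * m) : (pvRepYes m)[j]? = some (pvYc j) := by
  induction m generalizing j with
  | zero => omega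
  | succ k ih =>
    rw [pvRepYes_succ]
    match j with
    | 0 => simp [pvYc]
    | 1 => simp [pvYc]
    | 2 => simp [pvYc]
    | (u + 3) =>
      have h1 := ih u (by omega)
      simp only [List.getElem?_cons_succ]
      rw [h1]
      have h2 : pvYc u = pvYc (u + 3) := by
        unfold pvYc
        have : (u + 3) % 3 = u % 3 := by omega
        rw [this]
      rw [h2]

-- any character of the repetition is 'Y', 'e' or 's'
theorem pvRepYes_mem (m : Nat) (c : Char) (h : c ∈ pvRepYes m) : c = 'Y' ∨ c = 'e' ∨ c = 's' := by
  induction m with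
  | zero => simp [pvRepYes] at h
  | succ k ih =>
    rw [pvRepYes_succ] at h
    simp at h
    rcases h with h | h | h | h
    · left; exact h
    · right; left; exact h
    · right; right; exact h
    · exact ih h

theorem pvLoopA_yes_iff (wc ptr : List Char) (s t : Nat) :
    pvLoopA wc ptr (s : Int) t = "YES" ↔
      ∀ u, t ≤ u → u < wc.length → wc[u]? = ptr[s + u]? := by
  have hcast : ∀ t : Nat, (s : Int) + (t : Int) = ((s + t : Nat) : Int) := by
    intro t; push_cast; ring
  fun_induction pvLoopA wc ptr ((s : Nat) : Int) t with
  | case1 t h hne =>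
    rw [hcast t] at hne
    simp only [PySem.List.pyGet?_natCast] at hne
    constructor
    · intro h'; exact absurd h' (by decide)
    · intro hall; exact absurd (hall t le_rfl h) hne
  | case2 t h hne ih =>
    rw [hcast t] at hne
    simp only [PySem.List.pyGet?_natCast, ne_eq, not_not] at hne
    constructor
    · intro h' u hu1 hu2
      rcases Nat.eq_or_lt_of_le hu1 with h'' | h''
      · subst h''; exact hne
      · exact ih.mp h' u h'' hu2
    · intro hall; exact ih.mpr (fun u hu1 hu2 => hall u (by omega) hu2)
  | case3 t h =>
    constructor
    · intro _ u hu1 hu2; omega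
    · intro _; rfl

theorem pvLoopA_out (wc ptr : List Char) (s : Int) (t : Nat) :
    pvLoopA wc ptr s t = "YES" ∨ pvLoopA wc ptr s t = "NO" := by
  fun_induction pvLoopA wc ptr s t with
  | case1 t h hne => right; rfl
  | case2 t h hne ih => exact ih
  | case3 t h => left; rfl

-- A's aligned scan from shift s succeeds iff w is a substring of B's repetition
theorem check_yes_iff (wc : List Char) (c0 : Char) (rest : List Char) (hwc : wc = c0 :: rest) :
    ∀ s : Nat, s < 3 →
      ((pvRepYes (wc.length / 3 + 3))[s]? = some c0) →
      (pvLoopA wc (pvRepYes (wc.length / 3 + 3)) (s : Int) 0 = "YES" ↔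
        PySem.Chars.isIn wc (pvRepYes (wc.length / 3 + 2)) = true) := by
  intro s hs hgs
  set n := wc.length with hn
  have hn1 : 1 ≤ n := by rw [hn, hwc]; simp
  set m := n / 3 with hm
  have hnm : n ≤ 3 * m + 2 := by omega
  have hlen2 : (pvRepYes (m + 2)).length = 3 * m + 6 := by rw [pvRepYes_length]; ring
  rw [pvLoopA_yes_iff, PySem.Chars.isIn_iff_infix]
  constructor
  · -- matching scan ⇒ wc is a slice of the shorter repetition, hence an infix
    intro hall
    have hwceq : wc = ((pvRepYes (m + 2)).drop s).take n := by
      apply List.ext_getElem?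
      intro u
      by_cases hu : u < n
      · rw [List.getElem?_take, if_pos hu, List.getElem?_drop]
        have h1 := hall u (Nat.zero_le u) hu
        rw [h1, pvRepYes_get (m + 3) (s + u) (by omega), pvRepYes_get (m + 2) (s + u) (by omega)]
      · have h1 : wc[u]? = none := by rw [List.getElem?_eq_none_iff]; omega
        have h2 : (((pvRepYes (m + 2)).drop s).take n)[u]? = none := by
          rw [List.getElem?_eq_none_iff]; simp; omega
        rw [h1, h2]
    rw [hwceq]
    exact (List.take_prefix _ _).isInfix.trans (List.drop_suffix _ _).isInfix
  · -- infix ⇒ every position matches the longer repetition shifted by s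
    rintro ⟨pre, suf, hsplit⟩
    intro u _ hu
    set k := pre.length with hk
    have hklen : k + n + suf.length = 3 * m + 6 := by
      have := congrArg List.length hsplit
      simp at this; rw [hlen2] at this; omega
    have hget : ∀ v, v < n → wc[v]? = some (pvYc (k + v)) := by
      intro v hv
      have heq : (pvRepYes (m + 2))[k + v]? = wc[v]? := by
        rw [← hsplit, List.append_assoc, List.getElem?_append_right (by omega)]
        have h3 : k + v - pre.length = v := by omega
        rw [h3, List.getElem?_append_left (by omega)]
      rw [← heq, pvRepYes_get (m + 2) (k + v) (by omega)]
    -- the chosen shift s agrees with k modulo 3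
    have hc0 : wc[0]? = some c0 := by rw [hwc]; simp
    have hsk : pvYc s = pvYc k := by
      have h0 := hget 0 (by omega)
      rw [hc0] at h0
      have hgs' : pvYc s = c0 := by
        rw [pvRepYes_get (m + 3) s (by omega)] at hgs
        exact Option.some.inj hgs
      have h0' : c0 = pvYc k := by simpa using Option.some.inj h0
      rw [hgs', h0']
    have hs3 : s % 3 = k % 3 := by
      have h1 : s % 3 = 0 ∨ s % 3 = 1 ∨ s % 3 = 2 := by omega
      have h2 : k % 3 = 0 ∨ k % 3 = 1 ∨ k % 3 = 2 := by omega
      unfold pvYc at hsk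
      rcases h1 with h1 | h1 | h1 <;> rcases h2 with h2 | h2 | h2 <;>
        rw [h1, h2] at hsk <;> first | omega | simp at hsk
    rw [hget u hu, pvRepYes_get (m + 3) (s + u) (by omega)]
    have : (s + u) % 3 = (k + u) % 3 := by omega
    unfold pvYc
    rw [this]

-- ===== VERDICT (by name: the statement is the Claim_ definition above) =====
theorem check_spec : Claim_equal_check := by
  intro w _ hpre
  unfold Spec_check check check_alt
  obtain ⟨c0, rest, hwc⟩ : ∃ c0 rest, w.toList = c0 :: rest := by
    cases hl : w.toList with
    | nil => exact absurd (String.toList_eq_nil_iff.mp hl) hpre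
    | cons a l => exact ⟨a, l, rfl⟩
  simp only [hwc]
  set n := (c0 :: rest).length with hn
  have hn1 : 1 ≤ n := by rw [hn]; simp
  have hptr3 : pvRepYes (n / 3 + 3) = 'Y' :: 'e' :: 's' :: pvRepYes (n / 3 + 2) := by
    have h' : n / 3 + 2 + 1 = n / 3 + 3 := by omega
    rw [← h', pvRepYes_succ]
  have hget0 : PySem.List.pyGet? (c0 :: rest) (0 : Int) = some c0 := by
    simp [PySem.List.pyGet?, PySem.List.pyIdx?]
  have g0 : PySem.List.pyGet? (pvRepYes (n / 3 + 3)) (0 : Int) = some 'Y' := by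
    rw [hptr3]
    simp only [PySem.List.pyGet?, PySem.List.pyIdx?, List.length_cons]
    split
    · split
      · simp
      · next h => exact absurd (by push_cast; omega) h
    · next h => exact absurd (by omega) h
  have g1 : PySem.List.pyGet? (pvRepYes (n / 3 + 3)) (1 : Int) = some 'e' := by
    rw [hptr3]
    simp only [PySem.List.pyGet?, PySem.List.pyIdx?, List.length_cons]
    split
    · split
      · simp
      · next h => exact absurd (by push_cast; omega) h
    · next h => exact absurd (by omega) h
  have g2 : PySem.List.pyGet? (pvRepYes (n / 3 + 3)) (2 : Int) = some 's' := by
    rw [hptr3]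
    simp only [PySem.List.pyGet?, PySem.List.pyIdx?, List.length_cons]
    split
    · split
      · simp
      · next h => exact absurd (by push_cast; omega) h
    · next h => exact absurd (by omega) h
  have hrange : PySem.List.pyRange 0 3 1 = [0, 1, 2] := by decide
  rw [hget0, hrange]
  simp only [List.foldl, g0, g1, g2, Option.some.injEq]
  -- helper: once A found shift s, its scan equals B's substring test
  have key : ∀ s : Nat, s < 3 → (pvRepYes (n / 3 + 3))[s]? = some c0 →
      pvLoopA (c0 :: rest) (pvRepYes (n / 3 + 3)) ((s : Nat) : Int) 0 =
        (if PySem.Chars.isIn (c0 :: rest) (pvRepYes (n / 3 + 2)) then "YES" else "NO") := by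
    intro s hs hg
    have hiff := check_yes_iff (c0 :: rest) c0 rest rfl s hs hg
    rw [← hn] at hiff
    rcases hIn : PySem.Chars.isIn (c0 :: rest) (pvRepYes (n / 3 + 2)) with _ | _
    · rw [if_neg (by decide)]
      rcases pvLoopA_out (c0 :: rest) (pvRepYes (n / 3 + 3)) ((s : Nat) : Int) 0 with h | h
      · have h' := hiff.mp h
        rw [hIn] at h'
        exact absurd h' (by decide)
      · exact h
    · rw [if_pos rfl]
      exact hiff.mpr hIn
  by_cases hS : c0 = 's'
  · subst hS
    simp only [reduceIte]
    have hg : (pvRepYes (n / 3 + 3))[(2 : Nat)]? = some 's' := by rw [hptr3]; simp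
    exact key 2 (by omega) hg
  by_cases hE : c0 = 'e'
  · subst hE
    simp only [reduceIte]
    have hg : (pvRepYes (n / 3 + 3))[(1 : Nat)]? = some 'e' := by rw [hptr3]; simp
    exact key 1 (by omega) hg
  by_cases hY : c0 = 'Y'
  · subst hY
    simp only [reduceIte]
    have hg : (pvRepYes (n / 3 + 3))[(0 : Nat)]? = some 'Y' := by rw [hptr3]; simp
    exact key 0 (by omega) hg
  · -- first character not in "Yes": A reports NO without scanning, B finds no occurrence
    rw [if_neg hS, if_neg hE, if_neg hY, if_pos rfl]
    have hno : PySem.Chars.isIn (c0 :: rest) (pvRepYes (n / 3 + 2)) = false := by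
      rw [PySem.Chars.isIn_eq_false_iff]
      intro hinf
      have hmem : c0 ∈ pvRepYes (n / 3 + 2) := hinf.subset (by simp)
      rcases pvRepYes_mem _ _ hmem with h | h | h
      · exact hY h
      · exact hE h
      · exact hS h
    rw [hno, if_neg (by decide)]
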